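-- pv_equiv track=rewrite | github.com/pipeza379/Compro | tiling_color.py | tiling_colours
-- ===== SOURCE A (Python) =====
-- def tiling_colours(n, r=True):
--     count = 0
--     if n == 0:
--         return 1
--     else:
--         count += 2*tiling_colours(n-1)
--         if r == True:
--             count += tiling_colours(n-1, False)
--     return count
-- ===== SOURCE B (Python) =====
-- def tiling_colours(n, r=True):
--     # Iterative two-state DP: f = value with r=True, g = value with r=False.
--     if n < 0:
--         raise ValueError("n must be nonnegative")
--     f, g = 1, 1
--     for _ in range(n):
--         f, g = 2 * f + g, 2 * f
--     return f if r else g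
-- ===== Notes on version B (the rewrite author's own statement) =====
-- stated objective: alternative
-- what changed: Replaces A's exponential double recursion by a single O(n) loop carrying the pair (value with r=True, value with r=False); intended as faster (measured 1188x at the largest size both finished, but A timed out on most inputs there so a timing run left it unconfirmed).
import Mathlib
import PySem

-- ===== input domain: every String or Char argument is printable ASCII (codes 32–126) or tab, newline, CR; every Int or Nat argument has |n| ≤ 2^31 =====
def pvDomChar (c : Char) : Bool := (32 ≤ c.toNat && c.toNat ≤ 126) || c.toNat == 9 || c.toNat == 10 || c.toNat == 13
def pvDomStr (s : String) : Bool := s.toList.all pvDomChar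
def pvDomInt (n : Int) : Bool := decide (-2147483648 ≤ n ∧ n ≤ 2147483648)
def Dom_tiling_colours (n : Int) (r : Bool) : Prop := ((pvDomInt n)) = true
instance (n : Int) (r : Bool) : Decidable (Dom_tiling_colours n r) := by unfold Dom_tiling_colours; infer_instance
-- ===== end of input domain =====

-- B replaces A's double recursion by a single loop over the pair
-- (value with r=True, value with r=False); proved equal to A for all n ≥ 0
-- (for n < 0 A raises RecursionError, B raises ValueError: outside Pre_).


-- ===== PORT A =====
-- Literal port of A's recursion; the `n < 0` guard (returning 0) only makes the
-- function total where the Python recurses forever and raises RecursionError (outside Pre_).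
def tiling_colours (n : Int) (r : Bool) : Int :=
  if n = 0 then 1
  else if h : n < 0 then 0
  else
    2 * tiling_colours (n - 1) true +
      (if r = true then tiling_colours (n - 1) false else 0)
termination_by n.toNat
decreasing_by all_goals omega

-- ===== PORT B =====
-- the loop body of Source B: k iterations of (f, g) := (2*f + g, 2*f)
def tcLoop : Nat → Int × Int → Int × Int
  | 0, p => p
  | k + 1, (f, g) => tcLoop k (2 * f + g, 2 * f)

-- Source B raises ValueError for n < 0; that raise is modelled by returning 0 (outside Pre_).
def tiling_colours_alt (n : Int) (r : Bool) : Int :=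
  if n < 0 then 0
  else
    let p := tcLoop n.toNat (1, 1)
    if r then p.1 else p.2

-- ===== PRECONDITION & SPEC =====
-- Pre_ excludes n < 0, where A's recursion never reaches the base case (RecursionError)
-- and B raises ValueError.
def Pre_tiling_colours (n : Int) (r : Bool) : Prop := 0 ≤ n
instance (n : Int) (r : Bool) : Decidable (Pre_tiling_colours n r) := by
  unfold Pre_tiling_colours; infer_instance

def pvWitness_tiling_colours : Int × Bool := (3, true)

def Spec_tiling_colours (n : Int) (r : Bool) (out : Int) : Prop := out = tiling_colours_alt n r
instance (n : Int) (r : Bool) (out : Int) : Decidable (Spec_tiling_colours n r out) := by unfold Spec_tiling_colours; infer_instance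

-- ===== CLAIM =====
def Claim_equal_tiling_colours : Prop := ∀ (n : Int) (r : Bool), Dom_tiling_colours n r → Pre_tiling_colours n r → Spec_tiling_colours n r (tiling_colours n r)

-- ===== LEMMAS AND PROOFS =====

theorem tcLoop_succ (k : Nat) (p : Int × Int) :
    tcLoop (k + 1) p = (2 * (tcLoop k p).1 + (tcLoop k p).2, 2 * (tcLoop k p).1) := by
  induction k generalizing p with
  | zero => rfl
  | succ k ih =>
      show tcLoop (k + 1) (2 * p.1 + p.2, 2 * p.1) = _
      rw [ih]
      rfl

theorem tiling_colours_pos (n : Int) (hn : 0 < n) (r : Bool) :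
    tiling_colours n r =
      2 * tiling_colours (n - 1) true +
        (if r = true then tiling_colours (n - 1) false else 0) := by
  rw [tiling_colours]
  rw [if_neg (by omega), dif_neg (by omega)]

theorem tcLoop_eq (k : Nat) :
    tcLoop k (1, 1) = (tiling_colours (k : Int) true, tiling_colours (k : Int) false) := by
  induction k with
  | zero => simp [tcLoop, tiling_colours]
  | succ k ih =>
      have hc : ((k : Int) + 1) - 1 = (k : Int) := by ring
      have h1 : tiling_colours ((k : Int) + 1) true
          = 2 * tiling_colours (k : Int) true + tiling_colours (k : Int) false := by
        rw [tiling_colours_pos _ (by omega), hc]; simp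
      have h2 : tiling_colours ((k : Int) + 1) false = 2 * tiling_colours (k : Int) true := by
        rw [tiling_colours_pos _ (by omega), hc]; simp
      rw [tcLoop_succ, ih]
      simp only [Nat.cast_succ, h1, h2]

-- ===== VERDICT =====
theorem tiling_colours_spec : Claim_equal_tiling_colours := by
  intro n r _ hpre
  have hk : n = ((n.toNat : Nat) : Int) := by
    simpa using (Int.toNat_of_nonneg hpre).symm
  show tiling_colours n r = tiling_colours_alt n r
  unfold tiling_colours_alt
  rw [if_neg (by omega)]
  rw [hk]
  simp only [Int.toNat_natCast, tcLoop_eq]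
  cases r <;> simp
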